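-- pv_equiv track=rewrite | github.com/Matixy/golinski-zadrozny-grupa-4-jezyki-skryptowe-python | Lista2/src/findLongestSentenceWithoutSameStartingAdjacentLetters.py | isValidSentenceWithoutSameStartingAdjacentLetters
-- ===== SOURCE A (Python) =====
-- def isValidSentenceWithoutSameStartingAdjacentLetters(sentence):
--     """Sprawdza, czy żadne dwa sąsiadujące słowa nie zaczynają się na tę samą literę. Zgodnie z wymogami, analizujemy zdanie znak po znaku bez użycia list."""
--
--     lastFirstLetter = ""
--     isInWord = False
--
--     for char in sentence:
--         # Wyraz to ciąg znaków alfabetu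
--         if char.isalpha():
--             if not isInWord:
--                 # To jest pierwsza litera nowego słowa
--                 currentFirstLetter = char.lower()
--
--                 # Porównanie z pierwszą literą poprzedniego słowa
--                 if currentFirstLetter == lastFirstLetter:
--                     return False
--
--                 lastFirstLetter = currentFirstLetter
--                 isInWord = True
--         else:
--             # Znaki interpunkcyjne lub spacje oddzielają wyrazy
--             isInWord = False
--
--     return True
-- ===== SOURCE B (Python) =====
-- def isValidSentenceWithoutSameStartingAdjacentLetters(sentence):
--     # Build-then-compare: tokenize into words (maximal alphabetic runs),
--     # collect lowercased first letters, then check adjacent pairs.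
--     words = []
--     current = []
--     for ch in sentence:
--         if ch.isalpha():
--             current.append(ch)
--         else:
--             if current:
--                 words.append(current)
--                 current = []
--     if current:
--         words.append(current)
--     firsts = [w[0].lower() for w in words]
--     return all(a != b for a, b in zip(firsts, firsts[1:]))
-- ===== Notes on version B (the rewrite author's own statement) =====
-- stated objective: alternative
-- what changed: Replaces A's incremental in-word state machine with early return by a build-then-compare pipeline: tokenize into alphabetic-run words, collect lowercased first letters, then a separate pairwise pass over adjacent letters.
import Mathlib
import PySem

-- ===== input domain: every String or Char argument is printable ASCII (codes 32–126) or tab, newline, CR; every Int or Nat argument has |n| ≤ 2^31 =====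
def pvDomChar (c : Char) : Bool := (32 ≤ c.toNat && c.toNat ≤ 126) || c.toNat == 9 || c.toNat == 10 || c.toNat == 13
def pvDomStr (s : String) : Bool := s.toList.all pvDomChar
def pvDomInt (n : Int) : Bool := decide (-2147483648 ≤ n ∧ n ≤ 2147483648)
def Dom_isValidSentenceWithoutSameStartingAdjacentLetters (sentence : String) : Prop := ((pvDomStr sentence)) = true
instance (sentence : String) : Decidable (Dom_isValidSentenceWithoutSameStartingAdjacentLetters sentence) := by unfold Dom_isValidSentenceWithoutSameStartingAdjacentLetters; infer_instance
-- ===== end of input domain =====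

-- B replaces A's incremental in-word state machine (early return) by a build-then-compare
-- pipeline (tokenize into words, collect first letters, pairwise pass); objective: alternative.

-- ===== PORT A =====
-- A's loop over the characters; state = (lastFirstLetter, isInWord).
-- Python's lastFirstLetter is "" initially, then a one-char string; modelled as Option Char
-- (none for ""): exact, since a one-char string never equals "".
def pvGoA : List Char → Option Char → Bool → Bool
  | [], _, _ => true
  | c :: rest, last, inWord =>
    if PySem.Chars.isalpha c then
      if !inWord then
        let cur := PySem.Chars.lowerChar c
        if some cur == last then false
        else pvGoA rest (some cur) true
      else pvGoA rest last inWord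
    else pvGoA rest last false

def isValidSentenceWithoutSameStartingAdjacentLetters (sentence : String) : Bool :=
  pvGoA sentence.toList none false

-- ===== PORT B =====
-- B's tokenizer loop: words = maximal alphabetic runs (result list built structurally,
-- current word accumulated in order as in Source B).
def pvTokB : List Char → List Char → List (List Char)
  | [], cur => if cur = [] then [] else [cur]
  | c :: rest, cur =>
    if PySem.Chars.isalpha c then pvTokB rest (cur ++ [c])
    else if cur = [] then pvTokB rest [] else cur :: pvTokB rest []

-- w[0]: every word produced by pvTokB is nonempty, so headD with a dummy default is exact here.
def isValidSentenceWithoutSameStartingAdjacentLetters_alt (sentence : String) : Bool :=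
  let firsts := (pvTokB sentence.toList []).map (fun w => PySem.Chars.lowerChar (w.headD ' '))
  (firsts.zip (PySem.List.slice firsts (some 1) none)).all (fun p => !(p.1 == p.2))

-- ===== PRECONDITION & SPEC =====
def Spec_isValidSentenceWithoutSameStartingAdjacentLetters (sentence : String) (out : Bool) : Prop := out = isValidSentenceWithoutSameStartingAdjacentLetters_alt sentence
instance (sentence : String) (out : Bool) : Decidable (Spec_isValidSentenceWithoutSameStartingAdjacentLetters sentence out) := by unfold Spec_isValidSentenceWithoutSameStartingAdjacentLetters; infer_instance

-- ===== CLAIM (what is proved, stated in full; the proofs are below) =====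
def Claim_equal_isValidSentenceWithoutSameStartingAdjacentLetters : Prop := ∀ (sentence : String), Dom_isValidSentenceWithoutSameStartingAdjacentLetters sentence → Spec_isValidSentenceWithoutSameStartingAdjacentLetters sentence (isValidSentenceWithoutSameStartingAdjacentLetters sentence)

-- ===== LEMMAS AND PROOFS =====

-- first letters (lowercased) of the words still to be produced, given the partial current word
def pvFirsts (cs cur : List Char) : List Char :=
  (pvTokB cs cur).map (fun w => PySem.Chars.lowerChar (w.headD ' '))

-- sequential adjacent check, A-style, over a list of first letters
def pvChk : Option Char → List Char → Bool
  | _, [] => true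
  | last, f :: rest => if some f == last then false else pvChk (some f) rest

lemma pvFirsts_head : ∀ (cs cur : List Char), cur ≠ [] →
    pvFirsts cs cur = PySem.Chars.lowerChar (cur.headD ' ') :: (pvFirsts cs cur).tail := by
  intro cs
  induction cs with
  | nil => intro cur h; simp [pvFirsts, pvTokB, h]
  | cons c rest ih =>
    intro cur h
    by_cases ha : PySem.Chars.isalpha c
    · have hne : cur ++ [c] ≠ [] := by simp
      have hh : (cur ++ [c]).headD ' ' = cur.headD ' ' := by
        cases cur with
        | nil => exact absurd rfl h
        | cons x xs => rfl
      have ht : pvFirsts (c :: rest) cur = pvFirsts rest (cur ++ [c]) := by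
        simp [pvFirsts, pvTokB, ha]
      rw [ht]
      conv_lhs => rw [ih (cur ++ [c]) hne]
      rw [hh]
    · simp [pvFirsts, pvTokB, ha, h]

lemma pvMain : ∀ (cs : List Char),
    (∀ last, pvGoA cs last false = pvChk last (pvFirsts cs [])) ∧
    (∀ cur, cur ≠ [] →
      pvGoA cs (some (PySem.Chars.lowerChar (cur.headD ' '))) true
        = pvChk (some (PySem.Chars.lowerChar (cur.headD ' '))) ((pvFirsts cs cur).tail)) := by
  intro cs
  induction cs with
  | nil =>
    refine ⟨fun last => by simp [pvGoA, pvFirsts, pvTokB, pvChk], fun cur h => by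
      simp [pvGoA, pvFirsts, pvTokB, h, pvChk]⟩
  | cons c rest ih =>
    constructor
    · intro last
      by_cases ha : PySem.Chars.isalpha c
      · have hne : ([c] : List Char) ≠ [] := by simp
        have hhead := pvFirsts_head rest [c] hne
        have hq := ih.2 [c] hne
        simp only [List.headD_cons] at hhead hq
        have ht : pvFirsts (c :: rest) [] = pvFirsts rest [c] := by
          simp [pvFirsts, pvTokB, ha]
        by_cases he : some (PySem.Chars.lowerChar c) == last
        · have hA : pvGoA (c :: rest) last false = false := by simp [pvGoA, ha, he]
          rw [hA, ht, hhead]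
          simp [pvChk, he]
        · have hA : pvGoA (c :: rest) last false
              = pvGoA rest (some (PySem.Chars.lowerChar c)) true := by
            simp [pvGoA, ha, he]
          rw [hA, hq, ht, hhead]
          simp [pvChk, he]
      · have : pvFirsts (c :: rest) [] = pvFirsts rest [] := by
          simp [pvFirsts, pvTokB, ha]
        simp [pvGoA, ha, this, ih.1]
    · intro cur h
      by_cases ha : PySem.Chars.isalpha c
      · have hne : cur ++ [c] ≠ [] := by simp
        have hh : (cur ++ [c]).headD ' ' = cur.headD ' ' := by
          cases cur with
          | nil => exact absurd rfl h
          | cons x xs => rfl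
        have hq := ih.2 (cur ++ [c]) hne
        rw [hh] at hq
        have ht : pvFirsts (c :: rest) cur = pvFirsts rest (cur ++ [c]) := by
          simp [pvFirsts, pvTokB, ha]
        have hA : pvGoA (c :: rest) (some (PySem.Chars.lowerChar (cur.headD ' '))) true
            = pvGoA rest (some (PySem.Chars.lowerChar (cur.headD ' '))) true := by
          simp [pvGoA, ha]
        rw [hA, ht]
        exact hq
      · have ht : pvFirsts (c :: rest) cur
            = PySem.Chars.lowerChar (cur.headD ' ') :: pvFirsts rest [] := by
          simp [pvFirsts, pvTokB, ha, h]
        simp [pvGoA, ha, ht, ih.1]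

-- the sequential check from state `some l` is B's pairwise check on l :: fs
lemma pvChk_some_eq : ∀ (fs : List Char) (l : Char),
    pvChk (some l) fs = ((l :: fs).zip fs).all (fun p => !(p.1 == p.2)) := by
  intro fs
  induction fs with
  | nil => intro l; simp [pvChk]
  | cons f rest ih =>
    intro l
    by_cases he : f = l
    · simp [pvChk, he]
    · have hb : (some f == some l) = false := by simp [he]
      have hb2 : (l == f) = false := by simp [Ne.symm he]
      simp [pvChk, hb, hb2, ih]

lemma pvChk_none_eq (fs : List Char) :
    pvChk none fs = (fs.zip fs.tail).all (fun p => !(p.1 == p.2)) := by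
  cases fs with
  | nil => simp [pvChk]
  | cons f rest => simp [pvChk, pvChk_some_eq]

-- ===== VERDICT (by name: the statement is the Claim_ definition above) =====
theorem isValidSentenceWithoutSameStartingAdjacentLetters_spec : Claim_equal_isValidSentenceWithoutSameStartingAdjacentLetters := by
  intro s _
  unfold Spec_isValidSentenceWithoutSameStartingAdjacentLetters
  unfold isValidSentenceWithoutSameStartingAdjacentLetters isValidSentenceWithoutSameStartingAdjacentLetters_alt
  rw [(pvMain s.toList).1 none, pvChk_none_eq]
  simp [pvFirsts, PySem.List.slice_from_one]
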